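-- pv_equiv track=rewrite | github.com/arturyumaev/Computational-Algorithms | lab1/main.py | get_x0_nearest
-- ===== SOURCE A (Python) =====
-- def get_x0_nearest(x0, x, N):
--
--     if N % 2 != 0:
--         N += 1
--
--     if N == 0:
--         N = 2
--
--     # Searching for N neartest of x0
--     x_prev = 0
--     x_next = 0
--     N_nearest = []
--
--     for i in range(0, len(x) - 1):
--         if x0 > x[i] and x0 < x[i + 1]:
--             x_prev = x[i]
--             x_next = x[i + 1]
--
--             tmp_c = 0
--             t = 0
--             j = -1
--             while t != N // 2 and j != 0:
--                 j = i + tmp_c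
--                 N_nearest.append(x[j])
--                 tmp_c -= 1
--                 t += 1
--             N_nearest = [k for k in reversed(N_nearest)]
--
--             tmp_c = 0
--             t = 0
--             j = -1
--             while t != N // 2 and j != 0:
--                 j = i + tmp_c
--                 N_nearest.append(x[j + 1])
--                 tmp_c += 1
--                 t += 1
--             break # 2 nearest values was found
--
--     return N_nearest
-- ===== SOURCE B (Python) =====
-- def get_x0_nearest(x0, x, N):
--     if N % 2:
--         N += 1
--     h = N // 2 or 1          # number of points to take on each side
--     i = next((k for k, (a, b) in enumerate(zip(x, x[1:])) if a < x0 < b), None)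
--     if i is None:
--         return []
--     return x[max(0, i - h + 1):i + 1] + x[i + 1:i + 1 + h]
-- ===== Notes on version B (the rewrite author's own statement) =====
-- stated objective: simpler
-- what changed: B replaces A's two stateful sentinel while-loops (append + reverse + counter/sentinel variables) by finding the first bracketing interval with a single scan and returning two closed-form slices x[max(0,i-h+1):i+1] + x[i+1:i+1+h].
-- intended difference: When the first bracketing interval is the very first one (index 0) and N asks for at least 2 points per side with len(x) >= 3, A returns only [x[0], x[1]] because its right-hand while loop reuses the j==0 left-boundary sentinel where j legitimately becomes 0, while B returns the requested x[1:1+N//2] right neighbours, which is the intended 'N nearest points' behaviour. — e.g. on get_x0_nearest(1, [0, 2, 5], 4): A returns [0, 2], B returns [0, 2, 5]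
-- outside the precondition, e.g. on get_x0_nearest(1, [0, 2], -2): A returns [0, 2], B returns []
import Mathlib
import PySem

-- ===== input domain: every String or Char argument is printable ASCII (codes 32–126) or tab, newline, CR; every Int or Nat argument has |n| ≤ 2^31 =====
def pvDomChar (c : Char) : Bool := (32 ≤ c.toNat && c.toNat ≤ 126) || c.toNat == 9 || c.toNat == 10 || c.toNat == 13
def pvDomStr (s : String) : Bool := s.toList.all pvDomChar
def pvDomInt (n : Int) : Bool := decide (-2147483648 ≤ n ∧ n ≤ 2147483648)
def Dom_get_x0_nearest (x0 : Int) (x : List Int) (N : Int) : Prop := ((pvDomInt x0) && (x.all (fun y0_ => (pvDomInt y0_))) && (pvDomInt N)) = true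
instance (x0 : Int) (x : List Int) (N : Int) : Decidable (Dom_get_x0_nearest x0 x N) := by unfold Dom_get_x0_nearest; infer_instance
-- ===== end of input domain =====

-- B replaces A's two stateful sentinel while-loops by a single scan for the first bracketing
-- interval plus two closed-form slices (simpler); on the corner where A's right loop trips its
-- reused j==0 sentinel (first interval at index 0, N ≥ 3, len ≥ 3) B returns the full requested
-- right neighbours, stated below as D_get_x0_nearest.

-- ===== PORT A =====
-- first while loop of A: state (tmp_c, t, j, N_nearest); fuel only makes the loop total
def pvLoopL (x : List Int) (i h : Int) : Nat → Int → Int → Int → List Int → List Int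
  | 0, _, _, _, acc => acc
  | fuel+1, tmp_c, t, j, acc =>
    if t = h ∨ j = 0 then acc
    else
      match PySem.List.pyGet? x (i + tmp_c) with
      | none => acc            -- Python raises IndexError here (outside Pre_)
      | some v => pvLoopL x i h fuel (tmp_c - 1) (t + 1) (i + tmp_c) (acc ++ [v])

-- second while loop of A
def pvLoopR (x : List Int) (i h : Int) : Nat → Int → Int → Int → List Int → List Int
  | 0, _, _, _, acc => acc
  | fuel+1, tmp_c, t, j, acc =>
    if t = h ∨ j = 0 then acc
    else
      match PySem.List.pyGet? x (i + tmp_c + 1) with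
      | none => acc            -- Python raises IndexError here (outside Pre_)
      | some v => pvLoopR x i h fuel (tmp_c + 1) (t + 1) (i + tmp_c) (acc ++ [v])

-- loop body at the bracketing index i: run loop 1, reverse, run loop 2
def pvBodyA (x : List Int) (i : Nat) (h : Int) : List Int :=
  pvLoopR x i h (x.length + 1) 0 0 (-1)
    ((pvLoopL x i h (x.length + 1) 0 0 (-1) []).reverse)

-- 'for i in range(0, len(x) - 1): … break', the break modelled by returning the body's result
def pvForA (x0 : Int) (x : List Int) (h : Int) : Nat → Nat → List Int
  | 0, _ => []
  | fuel+1, i =>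
    if (i : Int) < (x.length : Int) - 1 then
      match PySem.List.pyGet? x (i : Int), PySem.List.pyGet? x ((i : Int) + 1) with
      | some xi, some xi1 =>
        if x0 > xi ∧ x0 < xi1 then pvBodyA x i h else pvForA x0 x h fuel (i + 1)
      | _, _ => pvForA x0 x h fuel (i + 1)
    else []

def get_x0_nearest (x0 : Int) (x : List Int) (N : Int) : List Int :=
  let N1 := if PySem.Int.mod N 2 ≠ 0 then N + 1 else N
  let N2 := if N1 = 0 then 2 else N1
  pvForA x0 x (PySem.Int.floordiv N2 2) x.length 0

-- ===== PORT B =====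
-- next((k for k, (a, b) in enumerate(zip(x, x[1:])) if a < x0 < b), None)
def pvFindIdx (x0 : Int) : List Int → Option Nat
  | a :: b :: rest =>
    if a < x0 ∧ x0 < b then some 0 else (pvFindIdx x0 (b :: rest)).map (· + 1)
  | _ => none

def get_x0_nearest_alt (x0 : Int) (x : List Int) (N : Int) : List Int :=
  let N' := if PySem.Int.mod N 2 ≠ 0 then N + 1 else N
  let h := if PySem.Int.floordiv N' 2 = 0 then 1 else PySem.Int.floordiv N' 2
  match pvFindIdx x0 x with
  | none => []
  | some i =>
      PySem.List.slice x (some (max 0 ((i : Int) - h + 1))) (some ((i : Int) + 1)) ++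
      PySem.List.slice x (some ((i : Int) + 1)) (some ((i : Int) + 1 + h))

-- ===== PRECONDITION & SPEC =====
-- the effective per-side count after A's two adjustments of N, in closed form
def pvHalfCount (N : Int) : Int := max 1 ((N + 1) / 2)

-- index of the first bracketing interval, via the standard library (input shape, not a port)
def pvBrk (x0 : Int) (x : List Int) : Option Nat :=
  (x.zip x.tail).findIdx? (fun p => decide (p.1 < x0 ∧ x0 < p.2))

-- Pre_ excludes inputs where A raises IndexError (the N//2 right neighbours of a bracketing
-- interval at index ≥ 1 run past the end of x) and negative counts N ≤ -2 (outside the natural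
-- domain; there A's loop target N//2 is negative and, with a bracketing interval at index 0,
-- the pair A returns is an accident of its sentinel while B returns []).
def Pre_get_x0_nearest (x0 : Int) (x : List Int) (N : Int) : Prop :=
  ((pvBrk x0 x).all fun k =>
    decide (-1 ≤ N ∧ (k = 0 ∨ (k : Int) + pvHalfCount N + 1 ≤ x.length))) = true
instance (x0 : Int) (x : List Int) (N : Int) : Decidable (Pre_get_x0_nearest x0 x N) := by
  unfold Pre_get_x0_nearest; infer_instance

def pvWitness_get_x0_nearest : Int × List Int × Int := (1, [0, 2], 0)

-- On inputs whose FIRST bracketing interval is the first one (index 0) with at least 2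
-- requested points per side and
-- len x ≥ 3, A returns only [x[0], x[1]] (its right while loop reuses the j==0 left-boundary
-- sentinel, which fires immediately at i=0), while B returns the requested N//2 right
-- neighbours x[1:1+N//2] as well — the intended 'N nearest points' behaviour.
def D_get_x0_nearest (x0 : Int) (x : List Int) (N : Int) : Prop :=
  pvBrk x0 x = some 0 ∧ 2 ≤ pvHalfCount N ∧ 3 ≤ x.length
instance (x0 : Int) (x : List Int) (N : Int) : Decidable (D_get_x0_nearest x0 x N) := by
  unfold D_get_x0_nearest; infer_instance

def Spec_get_x0_nearest (x0 : Int) (x : List Int) (N : Int) (out : List Int) : Prop :=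
  ¬ D_get_x0_nearest x0 x N → out = get_x0_nearest_alt x0 x N
instance (x0 : Int) (x : List Int) (N : Int) (out : List Int) : Decidable (Spec_get_x0_nearest x0 x N out) := by
  unfold Spec_get_x0_nearest; infer_instance

def pvDiffWitness_get_x0_nearest : Int × List Int × Int := (1, [0, 2, 5], 4)
def pvDiffWitnessOut_get_x0_nearest : (List Int) × (List Int) := ([0, 2], [0, 2, 5])

-- ===== CLAIM (what is proved, stated in full; the proofs are below) =====
def Claim_unchanged_get_x0_nearest : Prop := ∀ (x0 : Int) (x : List Int) (N : Int), Dom_get_x0_nearest x0 x N → Pre_get_x0_nearest x0 x N → Spec_get_x0_nearest x0 x N (get_x0_nearest x0 x N)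
def Claim_changed_get_x0_nearest : Prop := Dom_get_x0_nearest (pvDiffWitness_get_x0_nearest.1) (pvDiffWitness_get_x0_nearest.2.1) (pvDiffWitness_get_x0_nearest.2.2) ∧ Pre_get_x0_nearest (pvDiffWitness_get_x0_nearest.1) (pvDiffWitness_get_x0_nearest.2.1) (pvDiffWitness_get_x0_nearest.2.2) ∧ D_get_x0_nearest (pvDiffWitness_get_x0_nearest.1) (pvDiffWitness_get_x0_nearest.2.1) (pvDiffWitness_get_x0_nearest.2.2) ∧ get_x0_nearest (pvDiffWitness_get_x0_nearest.1) (pvDiffWitness_get_x0_nearest.2.1) (pvDiffWitness_get_x0_nearest.2.2) = pvDiffWitnessOut_get_x0_nearest.1 ∧ get_x0_nearest_alt (pvDiffWitness_get_x0_nearest.1) (pvDiffWitness_get_x0_nearest.2.1) (pvDiffWitness_get_x0_nearest.2.2) = pvDiffWitnessOut_get_x0_nearest.2 ∧ pvDiffWitnessOut_get_x0_nearest.1 ≠ pvDiffWitnessOut_get_x0_nearest.2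
def Claim_exact_get_x0_nearest : Prop := ∀ (x0 : Int) (x : List Int) (N : Int), Dom_get_x0_nearest x0 x N → Pre_get_x0_nearest x0 x N → D_get_x0_nearest x0 x N → get_x0_nearest x0 x N ≠ get_x0_nearest_alt x0 x N

-- ===== LEMMAS AND PROOFS =====

-- proof-side abbreviation for the h both ports compute (A: N//2 of the adjusted N; B: 'or 1')
def pvH (N : Int) : Int :=
  let N1 := if PySem.Int.mod N 2 ≠ 0 then N + 1 else N
  PySem.Int.floordiv (if N1 = 0 then 2 else N1) 2

theorem pvH_eq_halfCount (N : Int) (hN : -1 ≤ N) : pvH N = pvHalfCount N := by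
  unfold pvH pvHalfCount
  have hm : PySem.Int.mod N 2 = N % 2 := PySem.Int.mod_eq_emod_of_pos (by norm_num)
  rw [hm]
  split_ifs <;> rw [PySem.Int.floordiv_eq_ediv_of_pos (by norm_num)] <;> omega

-- proof-side model of A's first while loop: x[k], x[k-1], … until the counter reaches h
-- or index 0 has been emitted
def pvSegRev (x : List Int) (h : Int) (k t : Nat) : List Int :=
  if (t : Int) = h then []
  else x.getD k 0 :: (if hk : k = 0 then [] else pvSegRev x h (k - 1) (t + 1))
termination_by k
decreasing_by omega

theorem pvLoopL_j0 (x : List Int) (i h : Int) (fuel : Nat) (tmp t : Int) (acc : List Int) :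
    pvLoopL x i h fuel tmp t 0 acc = acc := by
  cases fuel <;> simp [pvLoopL]

theorem pvLoopR_j0 (x : List Int) (i h : Int) (fuel : Nat) (tmp t : Int) (acc : List Int) :
    pvLoopR x i h fuel tmp t 0 acc = acc := by
  cases fuel <;> simp [pvLoopR]

theorem pvLoopL_go (x : List Int) (i h : Int) :
    ∀ (fuel : Nat) (k t : Nat) (j : Int) (acc : List Int),
      k < x.length → j ≠ 0 → k + 1 ≤ fuel →
      pvLoopL x i h fuel ((k : Int) - i) t j acc = acc ++ pvSegRev x h k t := by
  intro fuel
  induction fuel with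
  | zero => intro k t j acc _ _ hf; omega
  | succ f ih =>
    intro k t j acc hklen hj _
    by_cases ht : (t : Int) = h
    · rw [pvSegRev]
      simp [pvLoopL, ht]
    · have hcond : ¬((t : Int) = h ∨ j = 0) := by tauto
      rw [pvLoopL, if_neg hcond, show i + ((k : Int) - i) = (k : Int) by ring,
        PySem.List.pyGet?_natCast, List.getElem?_eq_getElem hklen]
      rcases Nat.eq_zero_or_pos k with hk0 | hkpos
      · subst hk0
        dsimp only
        simp only [Nat.cast_zero]
        rw [pvLoopL_j0, pvSegRev, if_neg ht]
        simp [List.getD_eq_getElem?_getD, List.getElem?_eq_getElem hklen]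
      · rw [show ((k : Int) - i - 1) = (((k - 1 : Nat)) : Int) - i by
          push_cast [hkpos]; ring]
        dsimp only
        rw [show ((t : Int) + 1) = (((t + 1 : Nat)) : Int) by push_cast; ring]
        rw [ih (k - 1) (t + 1) (k : Int) (acc ++ [x[k]]) (by omega) (by omega) (by omega)]
        conv_rhs => rw [pvSegRev]
        rw [if_neg ht, dif_neg (by omega)]
        simp [List.getD_eq_getElem?_getD, List.getElem?_eq_getElem hklen]

theorem pvLoopR_go (x : List Int) (i h : Int) :
    ∀ (fuel : Nat) (k t : Nat) (j : Int) (acc : List Int),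
      1 ≤ k → j ≠ 0 → (t : Int) ≤ h → (k : Int) + 1 + (h - t) ≤ x.length →
      (h - t).toNat ≤ fuel →
      pvLoopR x i h fuel ((k : Int) - i) t j acc
        = acc ++ (x.drop (k + 1)).take (h - t).toNat := by
  intro fuel
  induction fuel with
  | zero =>
    intro k t j acc _ _ ht _ hf
    have h0 : (h - t).toNat = 0 := by omega
    simp [pvLoopR, h0]

  | succ f ih =>
    intro k t j acc hk hj ht hlen hf
    by_cases hth : (t : Int) = h
    · have h0 : (h - t).toNat = 0 := by omega
      simp [pvLoopR, hth]
    · have hcond : ¬((t : Int) = h ∨ j = 0) := by tauto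
      have hlt : (t : Int) < h := lt_of_le_of_ne ht hth
      have hk1len : k + 1 < x.length := by omega
      rw [pvLoopR, if_neg hcond,
        show i + ((k : Int) - i) + 1 = (((k + 1 : Nat)) : Int) by push_cast; ring,
        PySem.List.pyGet?_natCast, List.getElem?_eq_getElem hk1len,
        show i + ((k : Int) - i) = (k : Int) by ring,
        show ((k : Int) - i + 1) = (((k + 1 : Nat)) : Int) - i by push_cast; ring]
      dsimp only
      rw [show ((t : Int) + 1) = (((t + 1 : Nat)) : Int) by push_cast; ring]
      rw [ih (k + 1) (t + 1) (k : Int) (acc ++ [x[k + 1]]) (by omega) (by omega)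
        (by push_cast; omega) (by push_cast; omega) (by omega)]
      rw [List.drop_eq_getElem_cons hk1len,
        show (h - (t : Int)).toNat = (h - ((t : Int) + 1)).toNat + 1 by omega,
        List.take_succ_cons]
      push_cast
      simp

theorem pvSegRev_reverse (x : List Int) (h : Int) :
    ∀ (k t : Nat), k < x.length → (t : Int) < h →
      (pvSegRev x h k t).reverse
        = (x.drop (k + 1 - min (k + 1) (h - t).toNat)).take (min (k + 1) (h - t).toNat) := by
  intro k
  induction k with
  | zero =>
    intro t hlen hth
    rw [pvSegRev, if_neg (by omega)]
    have hmin : min 1 (h - (t : Int)).toNat = 1 := by omega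
    simp only [Nat.zero_add, hmin, Nat.sub_self, List.drop_zero]
    rw [show (1 : Nat) = 0 + 1 from rfl, List.take_add_one, List.take_zero]
    simp [List.getD_eq_getElem?_getD, List.getElem?_eq_getElem hlen]
  | succ k ih =>
    intro t hlen hth
    rw [pvSegRev, if_neg (by omega), dif_neg (by omega)]
    simp only [Nat.add_sub_cancel, List.reverse_cons]
    by_cases ht1 : ((t : Int) + 1) = h
    · rw [pvSegRev, if_pos (by push_cast; omega)]
      have hm : min (k + 1 + 1) (h - (t : Int)).toNat = 1 := by omega
      rw [hm]
      simp only [Nat.add_sub_cancel]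
      rw [List.drop_eq_getElem_cons hlen,
        show List.take 1 (x[k + 1] :: List.drop (k + 1 + 1) x) = [x[k + 1]] from rfl]
      simp [List.getD_eq_getElem?_getD, List.getElem?_eq_getElem hlen]
    · have hth1 : ((t : Int) + 1) < h := by omega
      have ihk := ih (t + 1) (by omega) (by push_cast; omega)
      rw [show (((t + 1 : Nat)) : Int) = (t : Int) + 1 by push_cast; ring] at ihk
      rw [ihk]
      set m' := min (k + 1) (h - ((t : Int) + 1)).toNat with hm'
      have hmm : min (k + 1 + 1) (h - (t : Int)).toNat = m' + 1 := by omega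
      have hlo : k + 1 + 1 - (m' + 1) = k + 1 - m' := by omega
      rw [hmm, hlo]
      rw [List.take_add_one]
      have hidx : k + 1 - m' + m' = k + 1 := by omega
      have hgd : (x.drop (k + 1 - m'))[m']? = some x[k + 1] := by
        rw [List.getElem?_drop, hidx, List.getElem?_eq_getElem hlen]
      rw [hgd]
      simp [List.getD_eq_getElem?_getD, List.getElem?_eq_getElem hlen]

theorem pvFindIdx_eq_brk (x0 : Int) : ∀ (x : List Int), pvFindIdx x0 x = pvBrk x0 x := by
  intro x
  induction x with
  | nil => simp [pvFindIdx, pvBrk]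
  | cons a l ih =>
    cases l with
    | nil => simp [pvFindIdx, pvBrk]
    | cons b r =>
      by_cases hc : a < x0 ∧ x0 < b
      all_goals simp [pvFindIdx, pvBrk, List.findIdx?_cons, hc]
      all_goals rw [show pvFindIdx x0 (b :: r) = pvBrk x0 (b :: r) from ih]
      all_goals simp [pvBrk]

theorem pvFindIdx_bound (x0 : Int) :
    ∀ (x : List Int) (k : Nat), pvFindIdx x0 x = some k →
      k + 1 < x.length ∧ x.getD k 0 < x0 ∧ x0 < x.getD (k + 1) 0 := by
  intro x
  induction x with
  | nil => intro k hk; simp [pvFindIdx] at hk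
  | cons a l ih =>
    cases l with
    | nil => intro k hk; simp [pvFindIdx] at hk
    | cons b r =>
      intro k hk
      by_cases hc : a < x0 ∧ x0 < b
      · simp [pvFindIdx, hc] at hk
        subst hk
        simpa using hc
      · simp [pvFindIdx, hc] at hk
        obtain ⟨k', hk', rfl⟩ := hk
        have := ih k' hk'
        simpa [List.getD_cons_succ] using this

theorem pvFindIdx_short (x0 : Int) (l : List Int) (hl : l.length ≤ 1) :
    pvFindIdx x0 l = none := by
  match l with
  | [] => rfl
  | [a] => rfl
  | a :: b :: r => simp at hl

theorem pvForA_spec (x0 : Int) (x : List Int) (h : Int) :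
    ∀ (fuel s : Nat), x.length ≤ fuel + s →
      pvForA x0 x h fuel s
        = (match pvFindIdx x0 (x.drop s) with
           | none => []
           | some k => pvBodyA x (s + k) h) := by
  intro fuel
  induction fuel with
  | zero =>
    intro s hs
    rw [pvFindIdx_short x0 _ (by simp; omega)]
    simp [pvForA]
  | succ f ih =>
    intro s hs
    by_cases hlt : (s : Int) < (x.length : Int) - 1
    · have hs1 : s + 1 < x.length := by omega
      have hs0 : s < x.length := by omega
      rw [pvForA, if_pos hlt, PySem.List.pyGet?_natCast,
        show ((s : Int) + 1) = (((s + 1 : Nat)) : Int) by push_cast; ring,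
        PySem.List.pyGet?_natCast, List.getElem?_eq_getElem hs0,
        List.getElem?_eq_getElem hs1]
      dsimp only
      rw [List.drop_eq_getElem_cons hs0, List.drop_eq_getElem_cons hs1]
      by_cases hc : x0 > x[s] ∧ x0 < x[s + 1]
      · rw [if_pos hc]
        have hsome : pvFindIdx x0 (x[s] :: x[s + 1] :: x.drop (s + 2)) = some 0 := by
          simp [pvFindIdx]
          exact ⟨hc.1, hc.2⟩
        rw [hsome]
        simp
      · rw [if_neg hc]
        rw [ih (s + 1) (by omega)]
        have hc' : ¬(x[s] < x0 ∧ x0 < x[s + 1]) := fun hh => hc ⟨hh.1, hh.2⟩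
        rw [show pvFindIdx x0 (x[s] :: x[s + 1] :: x.drop (s + 2))
            = (pvFindIdx x0 (x[s + 1] :: x.drop (s + 2))).map (· + 1) by
          simp [pvFindIdx, hc']]
        rw [List.drop_eq_getElem_cons hs1]
        cases hfi : pvFindIdx x0 (x[s + 1] :: x.drop (s + 2)) with
        | none => simp
        | some k => simp [show s + 1 + k = s + (k + 1) by omega]
    · rw [pvForA, if_neg hlt]
      rw [pvFindIdx_short x0 _ (by simp; omega)]

theorem pvHalf_if (M : Int) (hM : 2 ∣ M) :
    (if PySem.Int.floordiv M 2 = 0 then 1 else PySem.Int.floordiv M 2)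
      = PySem.Int.floordiv (if M = 0 then 2 else M) 2 := by
  obtain ⟨m, rfl⟩ := hM
  rcases eq_or_ne m 0 with rfl | hm
  · decide
  · rw [PySem.Int.floordiv_eq_ediv_of_pos (by norm_num)]
    have hdv : (2 : Int) * m / 2 = m := Int.mul_ediv_cancel_left m (by norm_num)
    rw [hdv, if_neg hm, if_neg (by omega),
      PySem.Int.floordiv_eq_ediv_of_pos (by norm_num), hdv]

theorem pvH_alt_eq (N : Int) :
    (if PySem.Int.floordiv (if PySem.Int.mod N 2 ≠ 0 then N + 1 else N) 2 = 0 then 1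
     else PySem.Int.floordiv (if PySem.Int.mod N 2 ≠ 0 then N + 1 else N) 2) = pvH N := by
  unfold pvH
  apply pvHalf_if
  have hm : PySem.Int.mod N 2 = N % 2 := PySem.Int.mod_eq_emod_of_pos (by norm_num)
  rw [hm]
  split_ifs with h1 <;> omega

theorem pvH_pos (N : Int) (hN : -1 ≤ N) : 1 ≤ pvH N := by
  unfold pvH
  have hm : PySem.Int.mod N 2 = N % 2 := PySem.Int.mod_eq_emod_of_pos (by norm_num)
  rw [hm]
  split_ifs <;>
    rw [PySem.Int.floordiv_eq_ediv_of_pos (by norm_num)] <;> omega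

theorem pvBodyA_zero (x : List Int) (h : Int) (hh : 1 ≤ h) (hlen : 2 ≤ x.length) :
    pvBodyA x 0 h = [x.getD 0 0, x.getD 1 0] := by
  unfold pvBodyA
  have h0len : 0 < x.length := by omega
  have h1len : 1 < x.length := by omega
  have hL := pvLoopL_go x 0 h (x.length + 1) 0 0 (-1) [] h0len (by norm_num) (by omega)
  simp only [Nat.cast_zero, sub_zero, List.nil_append] at hL ⊢
  rw [hL]
  rw [pvSegRev, if_neg (by omega), dif_pos rfl]
  rw [pvLoopR, if_neg (by simp; omega)]
  rw [show (0 : Int) + 0 + 1 = ((1 : Nat) : Int) by norm_num,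
    PySem.List.pyGet?_natCast, List.getElem?_eq_getElem h1len]
  rw [show (0 : Int) + 0 = 0 from by norm_num]
  dsimp only
  rw [pvLoopR_j0]
  simp [List.getD_eq_getElem?_getD, List.getElem?_eq_getElem h0len,
    List.getElem?_eq_getElem h1len]

theorem pvBodyA_pos (x : List Int) (k : Nat) (h : Int)
    (hk : 1 ≤ k) (hlen : (k : Int) + h + 1 ≤ x.length) (hh : 1 ≤ h) :
    pvBodyA x k h
      = (x.drop (k + 1 - min (k + 1) h.toNat)).take (min (k + 1) h.toNat)
        ++ (x.drop (k + 1)).take h.toNat := by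
  unfold pvBodyA
  have hklen : k < x.length := by omega
  have hL := pvLoopL_go x k h (x.length + 1) k 0 (-1) [] hklen (by norm_num) (by omega)
  simp only [Nat.cast_zero, sub_self, List.nil_append] at hL
  rw [hL]
  have hR := pvLoopR_go x k h (x.length + 1) k 0 (-1) (pvSegRev x h k 0).reverse
    hk (by norm_num) (by omega) (by push_cast; omega) (by omega)
  simp only [Nat.cast_zero, sub_self, sub_zero] at hR
  rw [hR]
  rw [pvSegRev_reverse x h k 0 hklen (by omega)]
  simp

theorem pvTake_one (x : List Int) (hlen : 0 < x.length) : x.take 1 = [x.getD 0 0] := by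
  rw [show (1 : Nat) = 0 + 1 from rfl, List.take_add_one, List.take_zero]
  simp [List.getD_eq_getElem?_getD, List.getElem?_eq_getElem hlen]

theorem pv_main (x0 : Int) (x : List Int) (N : Int)
    (hpre : Pre_get_x0_nearest x0 x N) (hnd : ¬ D_get_x0_nearest x0 x N) :
    get_x0_nearest x0 x N = get_x0_nearest_alt x0 x N := by
  simp only [get_x0_nearest, get_x0_nearest_alt]
  rw [pvH_alt_eq N]
  rw [show PySem.Int.floordiv
      (if (if PySem.Int.mod N 2 ≠ 0 then N + 1 else N) = 0 then 2
       else if PySem.Int.mod N 2 ≠ 0 then N + 1 else N) 2 = pvH N from rfl]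
  rw [pvForA_spec x0 x (pvH N) x.length 0 (by omega)]
  simp only [List.drop_zero]
  cases hfi : pvFindIdx x0 x with
  | none => rfl
  | some k =>
    have hbrk : pvBrk x0 x = some k := by rw [← pvFindIdx_eq_brk]; exact hfi
    unfold Pre_get_x0_nearest at hpre
    rw [hbrk] at hpre
    simp at hpre
    obtain ⟨hN1, hkor⟩ := hpre
    rw [← pvH_eq_halfCount N hN1] at hkor
    have hh : 1 ≤ pvH N := pvH_pos N hN1
    obtain ⟨hklen, hbl, hbr⟩ := pvFindIdx_bound x0 x k hfi
    simp only [Nat.zero_add]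
    rcases Nat.eq_zero_or_pos k with hk0 | hkpos
    · subst hk0
      unfold D_get_x0_nearest at hnd
      rw [hbrk, ← pvH_eq_halfCount N hN1] at hnd
      push Not at hnd
      have h2len : 2 ≤ x.length := by omega
      have hcorner : pvH N = 1 ∨ x.length = 2 := by
        rcases Nat.lt_or_ge x.length 3 with hl | hl
        · right; omega
        · left; have := hnd rfl; omega
      rw [pvBodyA_zero x (pvH N) hh h2len]
      rw [show max 0 (((0 : Nat) : Int) - pvH N + 1) = (0 : Int) by push_cast; omega,
        show ((0 : Nat) : Int) + 1 = (1 : Int) by norm_num,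
        PySem.List.slice_toNat x (by norm_num) (by norm_num),
        PySem.List.slice_toNat x (by norm_num) (by omega),
        show (0 : Int).toNat = 0 from rfl, show (1 : Int).toNat = 1 from rfl,
        List.drop_zero, Nat.sub_zero, pvTake_one x (by omega)]
      have hd1 : x.drop 1 = x.getD 1 0 :: x.drop 2 := by
        rw [List.drop_eq_getElem_cons (by omega : 1 < x.length),
          List.getD_eq_getElem?_getD, List.getElem?_eq_getElem (by omega : 1 < x.length)]
        rfl
      rw [hd1, show (1 + pvH N).toNat - 1 = (pvH N).toNat - 1 + 1 by omega,
        List.take_succ_cons]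
      rcases hcorner with hc | hc
      · rw [hc]
        simp
      · have hd2 : x.drop 2 = ([] : List Int) := by
          rw [← hc]; simp
        rw [hd2, List.take_nil]
        simp
    · have hkh : (k : Int) + pvH N + 1 ≤ x.length := by
        rcases hkor with h0 | h1 <;> omega
      rw [pvBodyA_pos x k (pvH N) hkpos hkh hh]
      rw [PySem.List.slice_toNat x (by positivity) (by positivity),
        PySem.List.slice_toNat x (by positivity) (by omega)]
      have e2 : ((k : Int) + 1).toNat - (max 0 ((k : Int) - pvH N + 1)).toNat
          = min (k + 1) (pvH N).toNat := by omega
      have e4 : ((k : Int) + 1 + pvH N).toNat - ((k : Int) + 1).toNat = (pvH N).toNat := by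
        omega
      have e1 : (max 0 ((k : Int) - pvH N + 1)).toNat = k + 1 - min (k + 1) (pvH N).toNat := by
        omega
      have e3 : ((k : Int) + 1).toNat = k + 1 := by omega
      rw [e2, e4, e1, e3]

-- ===== VERDICT (by name: the statement is the Claim_ definition above) =====
theorem get_x0_nearest_spec : Claim_unchanged_get_x0_nearest := by
  intro x0 x N _ hpre hnd
  exact pv_main x0 x N hpre hnd

theorem get_x0_nearest_changed : Claim_changed_get_x0_nearest := by
  unfold Claim_changed_get_x0_nearest; decide

theorem get_x0_nearest_tight : Claim_exact_get_x0_nearest := by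
  intro x0 x N _ hpre hd
  unfold D_get_x0_nearest at hd
  obtain ⟨hbrk, hh2, hlen3⟩ := hd
  have hfi : pvFindIdx x0 x = some 0 := by rw [pvFindIdx_eq_brk]; exact hbrk
  unfold Pre_get_x0_nearest at hpre
  rw [hbrk] at hpre
  simp at hpre
  have hN1 : -1 ≤ N := hpre
  rw [← pvH_eq_halfCount N hN1] at hh2
  intro heq
  have hA : get_x0_nearest x0 x N = [x.getD 0 0, x.getD 1 0] := by
    simp only [get_x0_nearest]
    rw [show PySem.Int.floordiv
        (if (if PySem.Int.mod N 2 ≠ 0 then N + 1 else N) = 0 then 2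
         else if PySem.Int.mod N 2 ≠ 0 then N + 1 else N) 2 = pvH N from rfl]
    rw [pvForA_spec x0 x (pvH N) x.length 0 (by omega)]
    simp only [List.drop_zero]
    rw [hfi]
    exact pvBodyA_zero x (pvH N) (by omega) (by omega)
  have hB : (get_x0_nearest_alt x0 x N).length = 1 + min (1 + pvH N).toNat x.length - 1 := by
    simp only [get_x0_nearest_alt]
    rw [pvH_alt_eq N, hfi]
    dsimp only
    rw [show max 0 (((0 : Nat) : Int) - pvH N + 1) = (0 : Int) by push_cast; omega,
      show ((0 : Nat) : Int) + 1 = (1 : Int) by norm_num,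
      PySem.List.slice_toNat x (by norm_num) (by norm_num),
      PySem.List.slice_toNat x (by norm_num) (by omega),
      show (0 : Int).toNat = 0 from rfl, show (1 : Int).toNat = 1 from rfl,
      List.drop_zero, Nat.sub_zero, pvTake_one x (by omega)]
    simp [List.length_take]
    omega
  rw [heq] at hA
  have := congrArg List.length hA
  simp at this
  omega
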